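-- pv_equiv track=rewrite | github.com/Saitejakatineni/SearchEngine | benchmark.py | _rerank_new
-- ===== SOURCE A (Python) =====
-- def _rerank_new(results, cluster_map):
--     groups = {}
--     for r in results:
--         cluster = cluster_map.get(r["url"], "99")
--         groups.setdefault(cluster, []).append(r)
--     ranked = []
--     for group in groups.values():
--         ranked.extend(group)
--     return [
--         {"title": r["title"], "url": r["url"], "meta_info": r["meta_info"], "rank": str(i + 1)}
--         for i, r in enumerate(ranked)
--     ]
-- ===== SOURCE B (Python) =====
-- def _rerank_new(results, cluster_map):
--     # Recursive partition: peel off the first result's cluster (head + matching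
--     # tail entries), recurse on the non-matching rest; then number ranks with a
--     # running counter. No dict-of-lists, no explicit cluster-order list.
--     def key(r):
--         return cluster_map.get(r["url"], "99")
--
--     def arrange(rs):
--         if not rs:
--             return []
--         head, tail = rs[0], rs[1:]
--         c = key(head)
--         same = [r for r in tail if key(r) == c]
--         rest = [r for r in tail if key(r) != c]
--         return [head] + same + arrange(rest)
--
--     out = []
--     rank = 1
--     for r in arrange(results):
--         out.append({"title": r["title"], "url": r["url"],
--                     "meta_info": r["meta_info"], "rank": str(rank)})
--         rank += 1
--     return out
-- ===== Notes on version B (the rewrite author's own statement) =====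
-- stated objective: alternative
-- what changed: Replaces A's dict-of-lists grouping (setdefault/append then concatenating dict values, then enumerate) with a recursive partition -- peel off the head result's cluster group and recurse on the non-matching rest -- and a running rank counter instead of enumerate.
import Mathlib
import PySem

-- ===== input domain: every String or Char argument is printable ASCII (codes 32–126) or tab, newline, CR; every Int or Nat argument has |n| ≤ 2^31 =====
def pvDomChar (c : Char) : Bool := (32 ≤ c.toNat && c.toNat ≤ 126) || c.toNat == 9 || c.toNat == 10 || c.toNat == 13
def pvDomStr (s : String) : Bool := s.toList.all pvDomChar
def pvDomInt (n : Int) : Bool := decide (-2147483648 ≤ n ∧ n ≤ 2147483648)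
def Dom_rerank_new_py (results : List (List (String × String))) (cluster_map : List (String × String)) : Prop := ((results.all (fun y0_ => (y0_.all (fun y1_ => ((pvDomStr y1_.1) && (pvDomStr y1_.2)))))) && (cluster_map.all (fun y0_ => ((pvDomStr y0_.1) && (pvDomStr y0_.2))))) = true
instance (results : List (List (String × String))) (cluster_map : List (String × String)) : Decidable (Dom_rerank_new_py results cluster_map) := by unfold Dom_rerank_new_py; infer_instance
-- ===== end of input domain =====

-- ===== PORT A =====
-- B replaces A's dict-of-lists grouping by a recursive partition (peel the head's
-- cluster, recurse on the rest) and numbers ranks with a running counter;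
-- alternative decomposition, same return value. Pre_ excludes results dicts missing
-- a required key (there Python A raises KeyError).

-- r[k] lookup (total variant; Pre_ guarantees the key is present where A reads it)
def pvGet (r : List (String × String)) (k : String) : String :=
  (PySem.Dict.mk r).getD k ""

-- cluster_map.get(r["url"], "99")
def pvCluster (cluster_map : List (String × String)) (r : List (String × String)) : String :=
  (PySem.Dict.mk cluster_map).getD (pvGet r "url") "99"

def pvOutRow (p : Int × List (String × String)) : List (String × String) :=
  [("title", pvGet p.2 "title"), ("url", pvGet p.2 "url"),
   ("meta_info", pvGet p.2 "meta_info"), ("rank", PySem.Int.toStr (p.1 + 1))]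

def rerank_new_py (results : List (List (String × String))) (cluster_map : List (String × String)) : List (List (String × String)) :=
  let groups : PySem.Dict String (List (List (String × String))) :=
    results.foldl (fun g r => g.modify (pvCluster cluster_map r) [] (fun l => l ++ [r])) PySem.Dict.empty
  let ranked : List (List (String × String)) :=
    groups.values.foldl (fun acc g => acc ++ g) []
  (PySem.List.enumerate ranked 0).map pvOutRow

-- ===== PORT B =====
-- key(r) = cluster_map.get(r["url"], "99")
def pvKeyB (cluster_map : List (String × String)) (r : List (String × String)) : String :=
  (PySem.Dict.mk cluster_map).getD ((PySem.Dict.mk r).getD "url" "") "99"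

-- arrange(rs): head's cluster group first, then recurse on the non-matching rest
def pvArrange (cluster_map : List (String × String)) : List (List (String × String)) → List (List (String × String))
  | [] => []
  | head :: tail =>
      let c := pvKeyB cluster_map head
      (head :: tail.filter (fun r => pvKeyB cluster_map r == c))
        ++ pvArrange cluster_map (tail.filter (fun r => !(pvKeyB cluster_map r == c)))
  termination_by rs => rs.length
  decreasing_by
    have h := List.length_filter_le (fun r => !(pvKeyB cluster_map r.1 == pvKeyB cluster_map head)) tail.attach
    simp only [List.length_attach] at h
    simpa using Nat.lt_succ_of_le h

-- one output dict with rank = str(rank)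
def pvRowB (rank : Int) (r : List (String × String)) : List (String × String) :=
  [("title", (PySem.Dict.mk r).getD "title" ""), ("url", (PySem.Dict.mk r).getD "url" ""),
   ("meta_info", (PySem.Dict.mk r).getD "meta_info" ""), ("rank", PySem.Int.toStr rank)]

def rerank_new_py_alt (results : List (List (String × String))) (cluster_map : List (String × String)) : List (List (String × String)) :=
  ((pvArrange cluster_map results).foldl
    (fun (p : List (List (String × String)) × Int) r => (p.1 ++ [pvRowB p.2 r], p.2 + 1))
    ([], 1)).1

-- ===== PRECONDITION & SPEC =====
-- Pre_ excludes inputs where some result dict lacks "title", "url" or "meta_info": there Python A raises KeyError.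
def Pre_rerank_new_py (results : List (List (String × String))) (cluster_map : List (String × String)) : Prop :=
  ∀ r ∈ results, (PySem.Dict.mk r).contains "title" = true ∧ (PySem.Dict.mk r).contains "url" = true ∧ (PySem.Dict.mk r).contains "meta_info" = true
instance (results : List (List (String × String))) (cluster_map : List (String × String)) : Decidable (Pre_rerank_new_py results cluster_map) := by unfold Pre_rerank_new_py; infer_instance
def pvWitness_rerank_new_py : (List (List (String × String))) × (List (String × String)) :=
  ([[("title", "t1"), ("url", "u1"), ("meta_info", "m1")], [("title", "t2"), ("url", "u2"), ("meta_info", "m2")]], [("u2", "3")])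

def Spec_rerank_new_py (results : List (List (String × String))) (cluster_map : List (String × String)) (out : List (List (String × String))) : Prop := out = rerank_new_py_alt results cluster_map
instance (results : List (List (String × String))) (cluster_map : List (String × String)) (out : List (List (String × String))) : Decidable (Spec_rerank_new_py results cluster_map out) := by unfold Spec_rerank_new_py; infer_instance

-- ===== CLAIM (what is proved, stated in full; the proofs are below) =====
def Claim_equal_rerank_new_py : Prop := ∀ (results : List (List (String × String))) (cluster_map : List (String × String)), Dom_rerank_new_py results cluster_map → Pre_rerank_new_py results cluster_map → Spec_rerank_new_py results cluster_map (rerank_new_py results cluster_map)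

-- ===== LEMMAS AND PROOFS =====
theorem pv_foldl_append (l : List (List (List (String × String)))) (init : List (List (String × String))) :
    l.foldl (fun acc g => acc ++ g) init = init ++ l.flatten := by
  induction l generalizing init with
  | nil => simp
  | cons x xs ih => simp [List.foldl_cons, ih, List.append_assoc]

-- A's ranked list = flatMap over the first-appearance cluster order of per-cluster filters
theorem rerank_ranked_eq (results : List (List (String × String))) (cluster_map : List (String × String)) :
    (results.foldl (fun g r => g.modify (pvCluster cluster_map r) [] (fun l => l ++ [r])) PySem.Dict.empty).values.foldl (fun acc g => acc ++ g) []
    = (results.foldl (fun s r => PySem.Set.add s (pvCluster cluster_map r)) []).flatMap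
        (fun c => results.filter (fun r => pvCluster cluster_map r == c)) := by
  set groups := results.foldl (fun g r => g.modify (pvCluster cluster_map r) [] (fun l => l ++ [r])) PySem.Dict.empty with hg
  have hnd : groups.keys.Nodup := by
    rw [hg]
    exact PySem.Dict.nodup_keys_foldl_modify_key results (pvCluster cluster_map) []
      (fun g r => fun l => l ++ [r]) PySem.Dict.empty (by simp [PySem.Dict.keys_empty])
  have hkeys : groups.keys = results.foldl (fun s r => PySem.Set.add s (pvCluster cluster_map r)) [] := by
    rw [hg, PySem.Dict.keys_foldl_modify_key, PySem.Dict.keys_empty, ← PySem.Set.update_map_eq_foldl_add,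
      PySem.Set.update_nil_left]
  have hget : ∀ c, groups.getD c [] = results.filter (fun r => pvCluster cluster_map r == c) := by
    intro c
    have hm : (results.map (fun r => (pvCluster cluster_map r, r))).foldl
        (fun (g : PySem.Dict String (List (List (String × String)))) p => g.modify p.1 [] (fun l => l ++ [p.2]))
        PySem.Dict.empty
        = results.foldl (fun g r => g.modify (pvCluster cluster_map r) [] (fun l => l ++ [r])) PySem.Dict.empty := by
      rw [List.foldl_map]
    rw [hg, ← hm, PySem.Dict.getD_foldl_modify_append, PySem.Dict.getD_empty]
    simp [List.filter_map, Function.comp_def]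
  rw [pv_foldl_append, List.nil_append,
    PySem.Dict.values_eq_map_keys groups hnd [], hkeys]
  simp [List.flatMap, hget]

-- peeling one distinct element off a PySem.Set fold
theorem pv_foldl_add_cons (l : List String) (s : List String) (c : String) (hc : c ∈ s) :
    l.foldl PySem.Set.add s = (l.filter (fun x => !(x == c))).foldl PySem.Set.add s := by
  induction l generalizing s with
  | nil => rfl
  | cons x xs ih =>
    by_cases hx : x = c
    · subst hx
      rw [List.foldl_cons, List.filter_cons, if_neg (by simp)]
      have hadd : PySem.Set.add s x = s := by
        simp [PySem.Set.add, PySem.Set.contains, hc]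
      rw [hadd]
      exact ih s hc
    · rw [List.foldl_cons, List.filter_cons, if_pos (by simp [hx]), List.foldl_cons]
      exact ih _ (by
        simp only [PySem.Set.add, PySem.Set.contains]
        split <;> simp [hc])

-- flatMap over the first-appearance order = the recursive partition pvArrange
theorem pv_flatMap_eq_arrange (cluster_map : List (String × String)) (rs : List (List (String × String))) :
    (rs.foldl (fun s r => PySem.Set.add s (pvCluster cluster_map r)) []).flatMap
        (fun c => rs.filter (fun r => pvCluster cluster_map r == c))
    = pvArrange cluster_map rs := by
  induction hn : rs.length using Nat.strong_induction_on generalizing rs with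
  | _ n ih =>
    match rs, hn with
    | [], _ => simp [pvArrange]
    | r0 :: tl, hn =>
      have hkey : ∀ r, pvCluster cluster_map r = pvKeyB cluster_map r := fun _ => rfl
      set c0 := pvCluster cluster_map r0 with hc0
      set rest := tl.filter (fun r => !(pvCluster cluster_map r == c0)) with hrest
      -- fold over the cons starts from [c0]
      have h1 : (r0 :: tl).foldl (fun s r => PySem.Set.add s (pvCluster cluster_map r)) []
          = tl.foldl (fun s r => PySem.Set.add s (pvCluster cluster_map r)) [c0] := by
        rw [List.foldl_cons]
        rfl
      -- peel c0 : the rest of the fold ignores elements with key c0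
      have h2 : tl.foldl (fun s r => PySem.Set.add s (pvCluster cluster_map r)) [c0]
          = rest.foldl (fun s r => PySem.Set.add s (pvCluster cluster_map r)) [c0] := by
        have h := pv_foldl_add_cons (tl.map (pvCluster cluster_map)) [c0] c0 (by simp)
        rw [List.filter_map, List.foldl_map, List.foldl_map] at h
        exact h
      -- and [c0] ++ fold from [] : Set.add never revisits c0 on rest
      have hrest_ne : ∀ r ∈ rest, ¬ (pvCluster cluster_map r = c0) := by
        intro r hr
        have := List.of_mem_filter hr
        simpa using this
      have h3 : rest.foldl (fun s r => PySem.Set.add s (pvCluster cluster_map r)) [c0]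
          = c0 :: rest.foldl (fun s r => PySem.Set.add s (pvCluster cluster_map r)) [] := by
        have gen : ∀ (l : List (List (String × String))) (s : List String),
            (∀ r ∈ l, ¬ (pvCluster cluster_map r = c0)) →
            l.foldl (fun s r => PySem.Set.add s (pvCluster cluster_map r)) (c0 :: s)
              = c0 :: l.foldl (fun s r => PySem.Set.add s (pvCluster cluster_map r)) s := by
          intro l
          induction l with
          | nil => intro s _; rfl
          | cons x xs ihl =>
            intro s hne
            simp only [List.foldl_cons]
            have hx : ¬ (pvCluster cluster_map x = c0) := hne x (by simp)
            have : PySem.Set.add (c0 :: s) (pvCluster cluster_map x)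
                = c0 :: PySem.Set.add s (pvCluster cluster_map x) := by
              simp only [PySem.Set.add, PySem.Set.contains, List.contains_eq_mem, List.mem_cons,
                decide_eq_true_eq]
              by_cases hm : pvCluster cluster_map x ∈ s
              · rw [if_pos (Or.inr hm), if_pos hm]
              · rw [if_neg (by tauto), if_neg hm]; rfl
            rw [this, ihl _ (fun r hr => hne r (by simp [hr]))]
        exact gen rest [] hrest_ne
      -- the members of the rest-fold all differ from c0
      have hmem : ∀ c ∈ rest.foldl (fun s r => PySem.Set.add s (pvCluster cluster_map r)) [], ¬ (c = c0) := by
        intro c hcm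
        have : c ∈ ([] : List String) ∨ c ∈ rest.map (pvCluster cluster_map) := by
          have h0 := hcm
          rw [← List.foldl_map] at h0
          have h := (PySem.Set.mem_update ([] : List String) (rest.map (pvCluster cluster_map)) c).mp
            (by simpa [PySem.Set.update] using h0)
          simpa using h
        rcases this with h | h
        · simp at h
        · rcases List.mem_map.mp h with ⟨r, hr, hrc⟩
          exact fun hcc => hrest_ne r hr (hrc.trans hcc)
      -- assemble
      rw [h1, h2, h3]
      simp only [List.flatMap_cons]
      have hhead : (r0 :: tl).filter (fun r => pvCluster cluster_map r == c0)
          = r0 :: tl.filter (fun r => pvCluster cluster_map r == c0) := by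
        simp [hc0]
      have htail : (rest.foldl (fun s r => PySem.Set.add s (pvCluster cluster_map r)) []).flatMap
            (fun c => (r0 :: tl).filter (fun r => pvCluster cluster_map r == c))
          = (rest.foldl (fun s r => PySem.Set.add s (pvCluster cluster_map r)) []).flatMap
            (fun c => rest.filter (fun r => pvCluster cluster_map r == c)) := by
        apply List.flatMap_congr
        intro c hcm
        have hc_ne : ¬ (c = c0) := hmem c hcm
        rw [hrest, List.filter_filter]
        simp only [List.filter_cons]
        have : (pvCluster cluster_map r0 == c) = false := by
          simp only [← hc0]
          exact beq_eq_false_iff_ne.mpr (fun h => hc_ne h.symm)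
        rw [this]
        apply List.filter_congr
        intro r _
        by_cases h : pvCluster cluster_map r = c
        · simp [h, hc_ne]
        · simp [h]
      have hrec : (rest.foldl (fun s r => PySem.Set.add s (pvCluster cluster_map r)) []).flatMap
            (fun c => rest.filter (fun r => pvCluster cluster_map r == c))
          = pvArrange cluster_map rest := by
        apply ih rest.length _ rest rfl
        calc rest.length ≤ tl.length := List.length_filter_le _ _
          _ < n := by simp at hn; omega
      rw [htail, hrec, hhead]
      conv_rhs => rw [pvArrange]
      simp only [← hkey, ← hc0, ← hrest]

-- B's counter fold = enumerate-map
theorem pv_fold_rows_eq (l : List (List (String × String))) (acc : List (List (String × String))) (k : Int) :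
    (l.foldl (fun (p : List (List (String × String)) × Int) r => (p.1 ++ [pvRowB p.2 r], p.2 + 1)) (acc, k)).1
    = acc ++ (PySem.List.enumerate l (k - 1)).map pvOutRow := by
  induction l generalizing acc k with
  | nil => simp [PySem.List.enumerate_nil]
  | cons x xs ih =>
    rw [List.foldl_cons, PySem.List.enumerate_cons]
    rw [ih]
    have hrow : pvOutRow (k - 1, x) = pvRowB k x := by
      simp [pvOutRow, pvRowB, pvGet]
    simp only [List.map_cons, hrow]
    have : k - 1 + 1 = k + 1 - 1 := by ring
    rw [this]
    simp [List.append_assoc]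

-- ===== VERDICT (by name: the statement is the Claim_ definition above) =====
theorem rerank_new_py_spec : Claim_equal_rerank_new_py := by
  intro results cluster_map _ _
  show (PySem.List.enumerate
      ((results.foldl (fun g r => g.modify (pvCluster cluster_map r) [] (fun l => l ++ [r])) PySem.Dict.empty).values.foldl
        (fun acc g => acc ++ g) []) 0).map pvOutRow
    = ((pvArrange cluster_map results).foldl
        (fun (p : List (List (String × String)) × Int) r => (p.1 ++ [pvRowB p.2 r], p.2 + 1)) ([], 1)).1
  rw [rerank_ranked_eq, pv_flatMap_eq_arrange, pv_fold_rows_eq]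
  norm_num
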